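-- pv_equiv track=rewrite | github.com/gary60182007/diu9u-obfuscator | luraph_source_rebuild.py | clean_stmts
-- ===== SOURCE A (Python) =====
-- def clean_stmts(stmts):
--     cleaned = []
--     for s in stmts:
--         if not s or s.strip() == '':
--             continue
--         if s.strip().startswith('-- test (dispatch)'):
--             continue
--         cleaned.append(s)
--
--     result = []
--     i = 0
--     while i < len(cleaned):
--         line = cleaned[i]
--         if line.strip().startswith('if ') and line.strip().endswith(' then'):
--             if i + 1 < len(cleaned) and cleaned[i+1].strip() == 'end':
--                 i += 2
--                 continue
--         result.append(line)
--         i += 1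
--
--     return result
-- ===== SOURCE B (Python) =====
-- def clean_stmts(stmts):
--     result = []
--     pending = None
--     for s in stmts:
--         if not s or s.strip() == '' or s.strip().startswith('-- test (dispatch)'):
--             continue
--         if (pending is not None and pending.strip().startswith('if ')
--                 and pending.strip().endswith(' then') and s.strip() == 'end'):
--             pending = None
--         else:
--             if pending is not None:
--                 result.append(pending)
--             pending = s
--     if pending is not None:
--         result.append(pending)
--     return result
-- ===== Notes on version B (the rewrite author's own statement) =====
-- stated objective: alternative
-- what changed: The two sequential passes (filter, then an indexed while-loop with i+=2 pair skipping) are fused into one pass over stmts carrying a single pending-line buffer that realises the one-line lookahead.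
import Mathlib
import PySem

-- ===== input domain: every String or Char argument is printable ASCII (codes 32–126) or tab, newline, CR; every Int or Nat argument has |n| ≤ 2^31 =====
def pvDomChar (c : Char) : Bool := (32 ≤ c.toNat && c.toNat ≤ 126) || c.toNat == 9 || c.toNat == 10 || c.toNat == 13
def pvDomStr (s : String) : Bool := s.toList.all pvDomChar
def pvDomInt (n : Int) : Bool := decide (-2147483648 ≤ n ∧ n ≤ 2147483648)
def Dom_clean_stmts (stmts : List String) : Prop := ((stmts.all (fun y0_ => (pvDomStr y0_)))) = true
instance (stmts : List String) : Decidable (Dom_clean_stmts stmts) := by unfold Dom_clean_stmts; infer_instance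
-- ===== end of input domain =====

-- B fuses A's two passes into one pass with a pending-line buffer; same result, same O(n) cost (objective: alternative).

-- ===== PORT A =====
-- first pass of A: drop empty/blank lines and '-- test (dispatch)' lines
def pvFilterA : List String → List String
  | [] => []
  | s :: rest =>
    if s == "" || PySem.Str.strip s == "" then pvFilterA rest
    else if PySem.Str.startswith (PySem.Str.strip s) "-- test (dispatch)" then pvFilterA rest
    else s :: pvFilterA rest

-- second pass of A: the while loop over `cleaned`, skipping (if ... then, end) pairs via i += 2.
-- The loop body pairs the bound check i+1 < len with the 'end' test; with one element left the line is
-- always appended (whatever the if-test says), which the singleton pattern transcribes.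
def pvPairA : List String → List String
  | [] => []
  | [line] => [line]
  | line :: e :: rest2 =>
    if (PySem.Str.startswith (PySem.Str.strip line) "if " && PySem.Str.endswith (PySem.Str.strip line) " then")
        && PySem.Str.strip e == "end" then
      pvPairA rest2
    else line :: pvPairA (e :: rest2)

def clean_stmts (stmts : List String) : List String := pvPairA (pvFilterA stmts)

-- ===== PORT B =====
def pvIsIfThen (p : String) : Bool :=
  PySem.Str.startswith (PySem.Str.strip p) "if " && PySem.Str.endswith (PySem.Str.strip p) " then"

def pvLoopB (result : List String) (pending : Option String) : List String → List String
  | [] =>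
    match pending with
    | some p => result ++ [p]
    | none => result
  | s :: rest =>
    if s == "" || PySem.Str.strip s == "" || PySem.Str.startswith (PySem.Str.strip s) "-- test (dispatch)" then
      pvLoopB result pending rest
    else
      match pending with
      | some p =>
        if pvIsIfThen p && PySem.Str.strip s == "end" then pvLoopB result none rest
        else pvLoopB (result ++ [p]) (some s) rest
      | none => pvLoopB result (some s) rest

def clean_stmts_alt (stmts : List String) : List String := pvLoopB [] none stmts

-- ===== PRECONDITION & SPEC =====
def Spec_clean_stmts (stmts : List String) (out : List String) : Prop := out = clean_stmts_alt stmts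
instance (stmts : List String) (out : List String) : Decidable (Spec_clean_stmts stmts out) := by unfold Spec_clean_stmts; infer_instance

-- ===== CLAIM (what is proved, stated in full; the proofs are below) =====
def Claim_equal_clean_stmts : Prop := ∀ (stmts : List String), Dom_clean_stmts stmts → Spec_clean_stmts stmts (clean_stmts stmts)

-- ===== LEMMAS AND PROOFS =====

-- definitional unfolding of A's pair pass on two leading lines
theorem pvPairA_cons_cons (x y : String) (l : List String) :
    pvPairA (x :: y :: l) =
      if (PySem.Str.startswith (PySem.Str.strip x) "if " && PySem.Str.endswith (PySem.Str.strip x) " then")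
          && PySem.Str.strip y == "end" then
        pvPairA l
      else x :: pvPairA (y :: l) := rfl

set_option maxHeartbeats 1000000 in
-- invariant of B's loop: pending = none resp. some p corresponds to A's pair pass on the filtered tail
theorem pvLoopB_inv (l : List String) :
    (∀ result, pvLoopB result none l = result ++ pvPairA (pvFilterA l)) ∧
    (∀ result p, pvLoopB result (some p) l = result ++ pvPairA (p :: pvFilterA l)) := by
  induction l with
  | nil => exact ⟨fun result => by simp [pvLoopB, pvFilterA, pvPairA],
                  fun result p => by simp [pvLoopB, pvFilterA, pvPairA]⟩
  | cons s rest ih =>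
    obtain ⟨ihn, ihs⟩ := ih
    refine ⟨fun result => ?_, fun result p => ?_⟩
    · cases hb1 : (s == "") <;> cases hb2 : (PySem.Str.strip s == "") <;>
        cases hb3 : (PySem.Str.startswith (PySem.Str.strip s) "-- test (dispatch)") <;>
        simp only [pvLoopB, pvFilterA, hb1, hb2, hb3, Bool.or_false,
          Bool.or_true, Bool.false_eq_true, if_true, if_false] <;>
        first
          | exact ihn result
          | exact ihs result s
    · cases hb1 : (s == "") <;> cases hb2 : (PySem.Str.strip s == "") <;>
        cases hb3 : (PySem.Str.startswith (PySem.Str.strip s) "-- test (dispatch)") <;>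
        simp only [pvLoopB, pvFilterA, pvIsIfThen, hb1, hb2, hb3, Bool.or_false,
          Bool.or_true, Bool.false_eq_true, if_true, if_false] <;>
        first
          | (rw [ihn result, ihs (result ++ [p]) s, pvPairA_cons_cons]
             split <;> simp)
          | exact ihs result p
-- ===== VERDICT (by name: the statement is the Claim_ definition above) =====
theorem clean_stmts_spec : Claim_equal_clean_stmts := by
  intro stmts _
  show clean_stmts stmts = clean_stmts_alt stmts
  rw [clean_stmts_alt, (pvLoopB_inv stmts).1 []]
  rfl
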